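-- pv_equiv track=rewrite | github.com/gina-yang/PortmanteauBot | bot_code/test.py | commonEndConsonant
-- ===== SOURCE A (Python) =====
-- def commonEndConsonant(string1, string2):
-- 	vowels = ["a", "e", "i", "o", "u", "y"]
-- 	for i in range(len(string1) - 1, 2, -1):
-- 		for j in range(1, len(string2) - 3):
-- 			if string1[i] == string2[j] and string1[i] not in vowels and string2[j] not in vowels:
-- 				pme = string1[:i] + string2[j:]
-- 				return pme
-- 	return "n/a"
-- ===== SOURCE B (Python) =====
-- def commonEndConsonant(string1, string2):
--     vowels = set("aeiouy")
--     first = {}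
--     for j in range(1, len(string2) - 3):
--         c = string2[j]
--         if c not in vowels and c not in first:
--             first[c] = j
--     for i in range(len(string1) - 1, 2, -1):
--         c = string1[i]
--         if c not in vowels:
--             j = first.get(c)
--             if j is not None:
--                 return string1[:i] + string2[j:]
--     return "n/a"
-- ===== Notes on version B (the rewrite author's own statement) =====
-- stated objective: alternative
-- what changed: Replaces A's nested scan (inner rescan of string2 for every position of string1) with a dict of the first eligible index per consonant of string2 built once, followed by a single backward scan of string1; on the measured inputs A returns early, so no speed-up was observed.
import Mathlib
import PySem

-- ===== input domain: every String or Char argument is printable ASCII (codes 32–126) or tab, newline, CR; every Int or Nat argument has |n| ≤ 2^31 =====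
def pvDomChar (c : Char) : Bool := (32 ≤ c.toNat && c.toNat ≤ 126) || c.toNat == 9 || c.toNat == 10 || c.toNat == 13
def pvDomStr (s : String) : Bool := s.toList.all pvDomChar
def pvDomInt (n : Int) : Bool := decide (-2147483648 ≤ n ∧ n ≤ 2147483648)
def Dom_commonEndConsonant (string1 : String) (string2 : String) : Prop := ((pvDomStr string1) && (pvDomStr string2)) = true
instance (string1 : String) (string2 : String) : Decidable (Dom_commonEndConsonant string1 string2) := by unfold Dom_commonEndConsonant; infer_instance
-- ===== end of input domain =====

-- B replaces A's nested scan with a dict of the first eligible index per consonant of string2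
-- built once, followed by a single backward scan of string1 (objective: alternative algorithm).

-- ===== PORT A =====
def pvVowels : List Char := ['a', 'e', 'i', 'o', 'u', 'y']

def commonEndConsonant (string1 : String) (string2 : String) : String :=
  match (PySem.List.pyRange ((string1.toList.length : Int) - 1) 2 (-1)).findSome? (fun i =>
      (PySem.List.pyRange 1 ((string2.toList.length : Int) - 3) 1).findSome? (fun j =>
        if PySem.List.pyGetD string1.toList i ' ' = PySem.List.pyGetD string2.toList j ' ' ∧
            PySem.List.pyGetD string1.toList i ' ' ∉ pvVowels ∧
            PySem.List.pyGetD string2.toList j ' ' ∉ pvVowels then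
          some (String.ofList (PySem.List.slice string1.toList none (some i) ++
                               PySem.List.slice string2.toList (some j) none))
        else none)) with
  | some pme => pme
  | none => "n/a"

-- ===== PORT B =====
def pvVowelsSet : PySem.Set Char := PySem.Set.ofList "aeiouy".toList

-- Source B's first loop: dict mapping each consonant of string2[1:len-3] to its first index
def pvFirstIdx (l2 : List Char) : PySem.Dict Char Int :=
  (PySem.List.pyRange 1 ((l2.length : Int) - 3) 1).foldl (fun d j =>
    if PySem.List.pyGetD l2 j ' ' ∉ pvVowelsSet ∧ d.get? (PySem.List.pyGetD l2 j ' ') = none then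
      d.insert (PySem.List.pyGetD l2 j ' ') j
    else d) PySem.Dict.empty

def commonEndConsonant_alt (string1 : String) (string2 : String) : String :=
  match (PySem.List.pyRange ((string1.toList.length : Int) - 1) 2 (-1)).findSome? (fun i =>
      if PySem.List.pyGetD string1.toList i ' ' ∉ pvVowelsSet then
        ((pvFirstIdx string2.toList).get? (PySem.List.pyGetD string1.toList i ' ')).map (fun j =>
          String.ofList (PySem.List.slice string1.toList none (some i) ++
                         PySem.List.slice string2.toList (some j) none))
      else none) with
  | some pme => pme
  | none => "n/a"

-- ===== PRECONDITION & SPEC =====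
def Spec_commonEndConsonant (string1 : String) (string2 : String) (out : String) : Prop := out = commonEndConsonant_alt string1 string2
instance (string1 : String) (string2 : String) (out : String) : Decidable (Spec_commonEndConsonant string1 string2 out) := by unfold Spec_commonEndConsonant; infer_instance

-- ===== CLAIM (what is proved, stated in full; the proofs are below) =====
def Claim_equal_commonEndConsonant : Prop := ∀ (string1 : String) (string2 : String), Dom_commonEndConsonant string1 string2 → Spec_commonEndConsonant string1 string2 (commonEndConsonant string1 string2)

-- ===== LEMMAS AND PROOFS =====

lemma vowelsSet_eq : pvVowelsSet = pvVowels := by decide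

lemma mem_vowelsSet_iff (c : Char) : c ∈ pvVowelsSet ↔ c ∈ pvVowels := by
  rw [vowelsSet_eq]

lemma findSome?_if_map {α β : Type} (l : List α) (p : α → Prop) [DecidablePred p] (f : α → β) :
    l.findSome? (fun a => if p a then some (f a) else none)
      = (l.findSome? (fun a => if p a then some a else none)).map f := by
  induction l with
  | nil => rfl
  | cons a t ih =>
    by_cases h : p a <;> simp [h, ih]

lemma findSome?_ext {α β : Type} (l : List α) (f g : α → Option β)
    (h : ∀ a, f a = g a) : l.findSome? f = l.findSome? g := by
  have : f = g := funext h
  rw [this]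

-- lookup in the first-index dict built by B's fold = first matching index of the scanned range
lemma get?_fold_first (l2 : List Char) (js : List Int) (d : PySem.Dict Char Int) (c : Char) :
    ((js.foldl (fun d j =>
        if PySem.List.pyGetD l2 j ' ' ∉ pvVowelsSet ∧ d.get? (PySem.List.pyGetD l2 j ' ') = none then
          d.insert (PySem.List.pyGetD l2 j ' ') j
        else d) d).get? c)
      = ((d.get? c).or
          (js.findSome? (fun j =>
            if PySem.List.pyGetD l2 j ' ' = c ∧ PySem.List.pyGetD l2 j ' ' ∉ pvVowelsSet
            then some j else none))) := by
  induction js generalizing d with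
  | nil => cases h : d.get? c <;> simp [h]
  | cons j js ih =>
    rw [List.foldl_cons, ih, List.findSome?_cons]
    by_cases hc : PySem.List.pyGetD l2 j ' ' ∉ pvVowelsSet ∧ d.get? (PySem.List.pyGetD l2 j ' ') = none
    · rw [if_pos hc]
      by_cases he : PySem.List.pyGetD l2 j ' ' = c
      · subst he
        rw [PySem.Dict.get?_insert_self, hc.2, if_pos ⟨rfl, hc.1⟩]
        simp
      · rw [PySem.Dict.get?_insert_of_ne _ _ (fun h => he h.symm),
            if_neg (fun h : _ ∧ _ => he h.1)]
    · rw [if_neg hc]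
      by_cases he : PySem.List.pyGetD l2 j ' ' = c
      · rcases not_and_or.mp hc with h | h
        · rw [if_neg (fun hh => absurd (not_not.mp h) hh.2)]
        · subst he
          rcases Option.ne_none_iff_exists'.mp h with ⟨v, hv⟩
          rw [hv]
          by_cases hV : PySem.List.pyGetD l2 j ' ' ∉ pvVowelsSet
          · rw [if_pos ⟨rfl, hV⟩]; simp
          · rw [if_neg (fun hh : _ ∧ _ => hV hh.2)]
      · rw [if_neg (fun h : _ ∧ _ => he h.1)]

lemma inner_eq (string1 string2 : String) (i : Int) :
    (PySem.List.pyRange 1 ((string2.toList.length : Int) - 3) 1).findSome? (fun j =>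
        if PySem.List.pyGetD string1.toList i ' ' = PySem.List.pyGetD string2.toList j ' ' ∧
            PySem.List.pyGetD string1.toList i ' ' ∉ pvVowels ∧
            PySem.List.pyGetD string2.toList j ' ' ∉ pvVowels then
          some (String.ofList (PySem.List.slice string1.toList none (some i) ++
                               PySem.List.slice string2.toList (some j) none))
        else none)
      = (if PySem.List.pyGetD string1.toList i ' ' ∉ pvVowelsSet then
          ((pvFirstIdx string2.toList).get? (PySem.List.pyGetD string1.toList i ' ')).map (fun j =>
            String.ofList (PySem.List.slice string1.toList none (some i) ++
                           PySem.List.slice string2.toList (some j) none))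
         else none) := by
  by_cases hv : PySem.List.pyGetD string1.toList i ' ' ∈ pvVowels
  · rw [if_neg (fun h => h ((mem_vowelsSet_iff _).mpr hv))]
    apply List.findSome?_eq_none_iff.mpr
    intro j _
    exact if_neg (fun h => h.2.1 hv)
  · rw [if_pos (fun h => hv ((mem_vowelsSet_iff _).mp h))]
    unfold pvFirstIdx
    rw [get?_fold_first, PySem.Dict.get?_empty, Option.none_or,
        ← findSome?_if_map _ _ (fun j =>
          String.ofList (PySem.List.slice string1.toList none (some i) ++
                         PySem.List.slice string2.toList (some j) none))]
    apply findSome?_ext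
    intro j
    apply if_congr _ rfl rfl
    constructor
    · rintro ⟨h1, _, h3⟩
      exact ⟨h1.symm, fun h => h3 ((mem_vowelsSet_iff _).mp h)⟩
    · rintro ⟨h1, h2⟩
      exact ⟨h1.symm, hv, fun h => h2 ((mem_vowelsSet_iff _).mpr h)⟩

-- ===== VERDICT (by name: the statement is the Claim_ definition above) =====
theorem commonEndConsonant_spec : Claim_equal_commonEndConsonant := by
  intro string1 string2 _
  unfold Spec_commonEndConsonant commonEndConsonant commonEndConsonant_alt
  rw [findSome?_ext _ _ _ (inner_eq string1 string2)]
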